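-- pv_equiv track=rewrite | github.com/Parth-307/avishkaar-2025 | backend/recommendation_engine.py | _determine_timeline
-- ===== SOURCE A (Python) =====
-- from typing import Dict, List, Optional, Any, Tuple
--
-- def _determine_timeline(recommendations: Dict) -> str:
--     """Determine overall implementation timeline from recommendations"""
--     max_timeline = "immediate"
--
--     for action in recommendations.get("immediate_actions", []):
--         timeline = action.get("timeline", "immediate")
--         if "2_hours" in timeline or "end_of_day" in timeline:
--             max_timeline = "long_term"
--         elif "1_hour" in timeline:
--             max_timeline = "medium_term"
--
--     return max_timeline
-- ===== SOURCE B (Python) =====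
-- def _determine_timeline(recommendations):
--     """Determine overall implementation timeline from recommendations"""
--     # The last matching action decides the result (A keeps overwriting an accumulator),
--     # so compute the index of the last long-match and the last medium-match and compare.
--     timelines = [a.get("timeline", "immediate")
--                  for a in recommendations.get("immediate_actions", [])]
--     last_long = max((i for i, t in enumerate(timelines)
--                      if "2_hours" in t or "end_of_day" in t), default=-1)
--     last_med = max((i for i, t in enumerate(timelines) if "1_hour" in t), default=-1)
--     if last_long >= 0 and last_long >= last_med:
--         return "long_term"
--     if last_med >= 0:
--         return "medium_term"
--     return "immediate"
-- ===== Notes on version B (the rewrite author's own statement) =====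
-- stated objective: alternative
-- what changed: B first extracts the timeline strings, then computes the indices of the last long-matching and last medium-matching actions and decides the label by comparing those two indices (ties go to long, matching A's elif priority), instead of A's single fold that overwrites an accumulator per action.
import Mathlib
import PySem

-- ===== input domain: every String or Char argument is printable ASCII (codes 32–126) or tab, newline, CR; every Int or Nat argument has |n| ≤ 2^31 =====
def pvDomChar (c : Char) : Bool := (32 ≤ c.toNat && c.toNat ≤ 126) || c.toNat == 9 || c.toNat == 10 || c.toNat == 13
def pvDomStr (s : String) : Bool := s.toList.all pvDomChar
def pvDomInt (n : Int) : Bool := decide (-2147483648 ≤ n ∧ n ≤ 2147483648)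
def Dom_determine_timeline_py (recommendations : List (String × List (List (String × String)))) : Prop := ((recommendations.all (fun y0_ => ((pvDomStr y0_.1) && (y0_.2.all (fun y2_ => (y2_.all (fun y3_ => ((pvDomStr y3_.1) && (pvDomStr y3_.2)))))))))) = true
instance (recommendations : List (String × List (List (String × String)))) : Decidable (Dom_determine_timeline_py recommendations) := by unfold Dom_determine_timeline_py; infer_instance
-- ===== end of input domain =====

-- B decides the label by comparing the indices of the last long-matching and last
-- medium-matching actions (two staged passes) instead of A's per-action overwrite fold;
-- return value only, no side effects involved. Equivalence is exact (A is total, no Pre_).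

-- ===== PORT A =====
-- the loop body of A: overwrite the accumulator when the action's timeline matches
def pvStepA (max_timeline : String) (action : List (String × String)) : String :=
  let timeline := (PySem.Dict.mk action).getD "timeline" "immediate"
  if PySem.Str.isIn "2_hours" timeline || PySem.Str.isIn "end_of_day" timeline then "long_term"
  else if PySem.Str.isIn "1_hour" timeline then "medium_term"
  else max_timeline

def determine_timeline_py (recommendations : List (String × List (List (String × String)))) : String :=
  ((PySem.Dict.mk recommendations).getD "immediate_actions" []).foldl pvStepA "immediate"

-- ===== PORT B =====
def pvTimeline (action : List (String × String)) : String :=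
  (PySem.Dict.mk action).getD "timeline" "immediate"

def pvIsLong (t : String) : Bool :=
  PySem.Str.isIn "2_hours" t || PySem.Str.isIn "end_of_day" t

def pvIsMed (t : String) : Bool := PySem.Str.isIn "1_hour" t

-- max(（i for i,t in enumerate(ts) if p t), default=-1)
def pvLastIdx (p : String → Bool) (ts : List String) : Int :=
  (PySem.List.enumerate ts 0).foldl (fun acc it => if p it.2 then max acc it.1 else acc) (-1)

def determine_timeline_py_alt (recommendations : List (String × List (List (String × String)))) : String :=
  let timelines := ((PySem.Dict.mk recommendations).getD "immediate_actions" []).map pvTimeline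
  let last_long := pvLastIdx pvIsLong timelines
  let last_med := pvLastIdx pvIsMed timelines
  if 0 ≤ last_long ∧ last_med ≤ last_long then "long_term"
  else if 0 ≤ last_med then "medium_term"
  else "immediate"

-- ===== PRECONDITION & SPEC =====
def Spec_determine_timeline_py (recommendations : List (String × List (List (String × String)))) (out : String) : Prop := out = determine_timeline_py_alt recommendations
instance (recommendations : List (String × List (List (String × String)))) (out : String) : Decidable (Spec_determine_timeline_py recommendations out) := by unfold Spec_determine_timeline_py; infer_instance

-- ===== CLAIM =====
def Claim_equal_determine_timeline_py : Prop := ∀ (recommendations : List (String × List (List (String × String)))), Dom_determine_timeline_py recommendations → Spec_determine_timeline_py recommendations (determine_timeline_py recommendations)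

-- ===== LEMMAS AND PROOFS =====

theorem pvLastIdx_aux_lt (p : String → Bool) (ts : List String) :
    ∀ (s acc : Int), acc < s + ts.length →
      (PySem.List.enumerate ts s).foldl (fun acc it => if p it.2 then max acc it.1 else acc) acc
        < s + ts.length := by
  induction ts with
  | nil => intro s acc h; simpa [PySem.List.enumerate_nil] using h
  | cons t ts ih =>
    intro s acc h
    simp only [PySem.List.enumerate_cons, List.foldl_cons, List.length_cons] at *
    have hlen : (0 : Int) ≤ ts.length := Int.natCast_nonneg _
    have : (if p t then max acc s else acc) < (s + 1) + ts.length := by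
      split <;> omega
    have := ih (s + 1) _ this
    omega

theorem pvLastIdx_lt (p : String → Bool) (ts : List String) :
    pvLastIdx p ts < ts.length := by
  have hlen : (0 : Int) ≤ ts.length := Int.natCast_nonneg _
  have := pvLastIdx_aux_lt p ts 0 (-1) (by omega)
  simpa [pvLastIdx] using this

theorem pvLastIdx_append_singleton (p : String → Bool) (ts : List String) (t : String) :
    pvLastIdx p (ts ++ [t]) = if p t then (ts.length : Int) else pvLastIdx p ts := by
  have hlt := pvLastIdx_lt p ts
  simp only [pvLastIdx, PySem.List.enumerate_append, List.foldl_append,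
    PySem.List.enumerate_cons, PySem.List.enumerate_nil, List.foldl_cons, List.foldl_nil] at *
  split <;> omega

-- pvStepA written via the B-side predicates (definitional)
theorem pvStepA_eq (m : String) (a : List (String × String)) :
    pvStepA m a =
      if pvIsLong (pvTimeline a) then "long_term"
      else if pvIsMed (pvTimeline a) then "medium_term" else m := rfl

-- A's fold equals B's index comparison
theorem foldA_eq_decide (l : List (List (String × String))) :
    l.foldl pvStepA "immediate" =
      (let ts := l.map pvTimeline
       if 0 ≤ pvLastIdx pvIsLong ts ∧ pvLastIdx pvIsMed ts ≤ pvLastIdx pvIsLong ts then "long_term"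
       else if 0 ≤ pvLastIdx pvIsMed ts then "medium_term"
       else "immediate") := by
  induction l using List.reverseRecOn with
  | nil => simp [pvLastIdx, PySem.List.enumerate_nil]
  | append_singleton l a ih =>
    have hL := pvLastIdx_lt pvIsLong (l.map pvTimeline)
    have hM := pvLastIdx_lt pvIsMed (l.map pvTimeline)
    have hlen : (0 : Int) ≤ l.length := Int.natCast_nonneg _
    simp only [List.length_map] at hL hM
    simp only [List.foldl_append, List.foldl_cons, List.foldl_nil, List.map_append,
      List.map_cons, List.map_nil, pvLastIdx_append_singleton, List.length_map,
      pvStepA_eq, ih]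
    by_cases hl : pvIsLong (pvTimeline a) <;> by_cases hm : pvIsMed (pvTimeline a) <;>
      simp only [hl, hm, if_true, if_false, Bool.false_eq_true] <;>
      split_ifs <;> first | rfl | omega
-- ===== VERDICT =====
theorem determine_timeline_py_spec : Claim_equal_determine_timeline_py := by
  intro recs _
  unfold Spec_determine_timeline_py determine_timeline_py determine_timeline_py_alt
  exact foldA_eq_decide _
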